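-- pv_equiv track=rewrite | github.com/HKuz/Test_Code | CodeFights/rounders.py | rounders
-- ===== SOURCE A (Python) =====
-- def rounders(value):
--     i = 0
--     while value > 10:
--         digit = value % 10
--         if digit >= 5:
--             value += 10
--         value //= 10
--         i += 1
--     return value * (10**i)
-- ===== SOURCE B (Python) =====
-- def rounders(value):
--     if value <= 10:
--         return value
--     # phase 1: split off the trailing digits, least significant first
--     digits = []
--     while value > 10:
--         digits.append(value % 10)
--         value //= 10
--     # phase 2: propagate a single round-up carry through the digits
--     carry = 0
--     for d in digits:
--         carry = 1 if d + carry >= 5 else 0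
--     head = value + carry
--     if head > 10:  # carry overflow: head 10 + 1 = 11 rounds once more to 10
--         head = 10
--     return head * 10 ** len(digits)
-- ===== Notes on version B (the rewrite author's own statement) =====
-- stated objective: alternative
-- what changed: Replaces the single destructive rounding loop (with the i counter and 10**i scaling) by two staged passes: first split the number into its trailing digit list, then fold a 0/1 round-up carry through that list and rebuild head * 10**len(digits).
import Mathlib
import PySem

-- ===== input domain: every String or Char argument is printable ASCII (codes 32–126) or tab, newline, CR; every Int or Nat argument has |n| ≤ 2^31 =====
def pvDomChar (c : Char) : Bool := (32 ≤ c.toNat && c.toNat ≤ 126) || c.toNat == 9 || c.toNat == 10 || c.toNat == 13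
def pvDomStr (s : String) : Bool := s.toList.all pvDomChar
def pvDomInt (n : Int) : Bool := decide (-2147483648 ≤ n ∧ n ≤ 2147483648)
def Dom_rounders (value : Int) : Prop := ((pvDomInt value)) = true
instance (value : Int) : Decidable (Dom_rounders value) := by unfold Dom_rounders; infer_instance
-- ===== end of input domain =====

-- B replaces A's destructive rounding loop by two staged passes (digit-list extraction, then a carry fold); alternative decomposition, same cost.

-- ===== PORT A =====
-- the while loop of A, carrying the i counter; returns value * 10**i when the loop exits
def roundersGo (value : Int) (i : Nat) : Int :=
  if h : 10 < value then
    roundersGo (PySem.Int.floordiv (if 5 ≤ PySem.Int.mod value 10 then value + 10 else value) 10) (i + 1)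
  else value * 10 ^ i
termination_by value.toNat
decreasing_by
  simp only [PySem.Int.floordiv_eq_ediv_of_pos (by norm_num : (0:Int) < 10),
    PySem.Int.mod_eq_emod_of_pos (by norm_num : (0:Int) < 10)] at *
  split <;> omega

def rounders (value : Int) : Int := roundersGo value 0

-- ===== PORT B =====
-- phase 1 of Source B: the trailing digits (least significant first) together with the remaining head
def collectDigits (q : Int) : List Int × Int :=
  if h : 10 < q then
    let p := collectDigits (PySem.Int.floordiv q 10)
    (PySem.Int.mod q 10 :: p.1, p.2)
  else ([], q)
termination_by q.toNat
decreasing_by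
  simp only [PySem.Int.floordiv_eq_ediv_of_pos (by norm_num : (0:Int) < 10)]
  omega

def rounders_alt (value : Int) : Int :=
  if value ≤ 10 then value
  else
    let p := collectDigits value
    -- phase 2 of Source B: propagate a single round-up carry through the digit list
    let carry := p.1.foldl (fun c d => if 5 ≤ d + c then (1 : Int) else 0) 0
    let head := p.2 + carry
    (if 10 < head then 10 else head) * 10 ^ p.1.length

-- ===== PRECONDITION & SPEC =====
def Spec_rounders (value : Int) (out : Int) : Prop := out = rounders_alt value
instance (value : Int) (out : Int) : Decidable (Spec_rounders value out) := by unfold Spec_rounders; infer_instance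

-- ===== CLAIM (what is proved, stated in full; the proofs are below) =====
def Claim_equal_rounders : Prop := ∀ (value : Int), Dom_rounders value → Spec_rounders value (rounders value)

-- ===== LEMMAS AND PROOFS =====

-- loop/fold correspondence: running A's loop on q + c (c the pending carry) equals
-- B's reconstruction from the digit list of q
lemma roundersGo_collect (q : Int) : ∀ (c : Int), c = 0 ∨ c = 1 → ∀ (i : Nat),
    roundersGo (q + c) i =
      (let p := collectDigits q
       let carry := p.1.foldl (fun c d => if 5 ≤ d + c then (1 : Int) else 0) c
       let head := p.2 + carry
       (if 10 < head then 10 else head) * 10 ^ (i + p.1.length)) := by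
  induction q using collectDigits.induct with
  | case1 q hq ih =>
      intro c hc i
      have h10 : (0:Int) < 10 := by norm_num
      rw [collectDigits, dif_pos hq]
      simp only [PySem.Int.floordiv_eq_ediv_of_pos h10, PySem.Int.mod_eq_emod_of_pos h10] at *
      have hd := Int.emod_nonneg q (by norm_num : (10:Int) ≠ 0)
      have hdlt : q % 10 < 10 := Int.emod_lt_of_pos q h10
      have hqc : 10 < q + c := by omega
      rw [roundersGo, dif_pos hqc]
      simp only [PySem.Int.floordiv_eq_ediv_of_pos h10, PySem.Int.mod_eq_emod_of_pos h10]
      have hsplit : q = 10 * (q / 10) + q % 10 := (Int.ediv_add_emod q 10).symm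
      -- the next loop state equals q / 10 + c' where c' is the new carry
      have hstep : (if 5 ≤ (q + c) % 10 then q + c + 10 else q + c) / 10
          = q / 10 + (if 5 ≤ q % 10 + c then (1:Int) else 0) := by
        rcases hc with rfl | rfl <;> split_ifs <;> omega
      rw [hstep]
      have hc' : (if 5 ≤ q % 10 + c then (1:Int) else 0) = 0 ∨ (if 5 ≤ q % 10 + c then (1:Int) else 0) = 1 := by
        split_ifs <;> simp
      rw [ih _ hc' (i + 1)]
      simp only [List.foldl_cons, List.length_cons]
      have : i + 1 + (collectDigits (q / 10)).1.length = i + ((collectDigits (q / 10)).1.length + 1) := by omega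
      rw [this]
  | case2 q hq =>
      intro c hc i
      rw [collectDigits, dif_neg hq]
      simp only [List.foldl_nil, List.length_nil, Nat.add_zero]
      push_neg at hq
      rcases hc with rfl | rfl
      · rw [roundersGo, dif_neg (by omega : ¬ 10 < q + 0)]
        rw [if_neg (by omega : ¬ 10 < q + 0)]
      · by_cases h11 : 10 < q + 1
        · -- q = 10, carry 1: one more loop iteration in A, clamped head in B
          have hq10 : q = 10 := by omega
          subst hq10
          rw [roundersGo, dif_pos h11]
          have h1 : (if 5 ≤ PySem.Int.mod (10 + 1) 10 then (10:Int) + 1 + 10 else 10 + 1) = 11 := by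
            decide
          rw [h1]
          have h2 : PySem.Int.floordiv (11:Int) 10 = 1 := by decide
          rw [h2, roundersGo, dif_neg (by norm_num : ¬ (10:Int) < 1)]
          rw [if_pos (by norm_num : (10:Int) < 10 + 1)]
          ring
        · rw [roundersGo, dif_neg h11, if_neg h11]

-- ===== VERDICT (by name: the statement is the Claim_ definition above) =====
theorem rounders_spec : Claim_equal_rounders := by
  intro value _
  unfold Spec_rounders rounders rounders_alt
  by_cases hv : value ≤ 10
  · rw [roundersGo, dif_neg (by omega : ¬ 10 < value), if_pos hv]
    ring
  · rw [if_neg hv]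
    have := roundersGo_collect value 0 (Or.inl rfl) 0
    simpa using this
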